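-- pv_equiv track=rewrite | github.com/Vadim-Kolesnikov/Console-Task-Manager | task_manager/utils/task_list.py | prep_text
-- ===== SOURCE A (Python) =====
-- def prep_text(text: str, string_len: int) -> str:
--     '''
--     Преобразует поля задачи
--     в строку/строки для вывода в консоль
--     '''
--
--     words = text.split(' ')
--     strings = []
--     string = '| '
--     for word in words:
--         if len(string + word + " ") >= (string_len - 1):
--             if len(string) < (string_len - 1):
--                 string += ' ' * (string_len - 1 - len(string))
--             string += '|'
--             strings.append(string)
--             string = '| '
--         string += word + " "
--     if not string.endswith('|'):
--         if len(string) < (string_len - 1):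
--             string += ' ' * (string_len - 1 - len(string))
--         string += '|'
--     strings.append(string)
--     return '\n'.join(strings)
-- ===== SOURCE B (Python) =====
-- def prep_text(text: str, string_len: int) -> str:
--     # Pass 1: group words greedily, tracking only the running line length.
--     words = text.split(' ')
--     groups = []
--     cur = []
--     n = 2  # len('| ')
--     for word in words:
--         if n + len(word) + 1 >= string_len - 1:
--             groups.append(cur)
--             cur = [word]
--             n = 2 + len(word) + 1
--         else:
--             cur.append(word)
--             n += len(word) + 1
--     groups.append(cur)
--     # Pass 2: render every group the same way.
--     lines = []
--     for grp in groups: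
--         line = '| ' + ''.join(w + ' ' for w in grp)
--         if len(line) < string_len - 1:
--             line += ' ' * (string_len - 1 - len(line))
--         line += '|'
--         lines.append(line)
--     return '\n'.join(lines)
-- ===== Notes on version B (the rewrite author's own statement) =====
-- stated objective: simpler
-- what changed: Replaced A's single loop that mutates a growing padded line string with two independent passes: a grouping pass over words tracking only a running length counter, then a rendering pass that formats each word-group into a bordered line.
import Mathlib
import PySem

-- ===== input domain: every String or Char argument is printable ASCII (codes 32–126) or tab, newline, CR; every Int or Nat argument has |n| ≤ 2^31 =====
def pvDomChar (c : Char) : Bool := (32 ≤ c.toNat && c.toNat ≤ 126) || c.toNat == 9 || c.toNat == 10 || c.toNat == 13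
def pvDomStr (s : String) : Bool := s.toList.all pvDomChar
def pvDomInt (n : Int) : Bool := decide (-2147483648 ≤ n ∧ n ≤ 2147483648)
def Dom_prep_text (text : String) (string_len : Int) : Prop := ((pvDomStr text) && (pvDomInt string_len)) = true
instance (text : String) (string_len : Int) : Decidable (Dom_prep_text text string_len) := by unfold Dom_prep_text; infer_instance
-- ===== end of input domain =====

-- B replaces A's single loop mutating a growing line string with two passes: a grouping
-- pass that only tracks a running length counter, then an independent rendering pass
-- (objective: simpler decomposition; not faster).

-- ===== PORT A =====
-- A's loop state: (finished lines, current line string); work on List Char per PySem.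
def prep_text (text : String) (string_len : Int) : String :=
  let words := PySem.Chars.splitOn text.toList [' ']
  let fin := words.foldl (fun (st : List (List Char) × List Char) word =>
    let strings := st.1
    let string := st.2
    let st' :=
      if ((string ++ word ++ [' ']).length : Int) ≥ string_len - 1 then
        let string :=
          if (string.length : Int) < string_len - 1 then
            string ++ List.replicate (string_len - 1 - string.length).toNat ' '
          else string
        let string := string ++ ['|']
        (strings ++ [string], ['|', ' '])
      else (strings, string)
    (st'.1, st'.2 ++ word ++ [' '])) ([], ['|', ' '])
  let strings := fin.1
  let string := fin.2
  let string :=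
    if ¬ (PySem.Chars.endswith string ['|'] = true) then
      let string :=
        if (string.length : Int) < string_len - 1 then
          string ++ List.replicate (string_len - 1 - string.length).toNat ' '
        else string
      string ++ ['|']
    else string
  String.ofList (PySem.Chars.join ['\n'] (strings ++ [string]))

-- ===== PORT B =====
-- grouping pass: state = (finished groups, current group, running line length n)
def prep_text_alt_groups (words : List (List Char)) (string_len : Int) :
    List (List (List Char)) × List (List Char) × Int :=
  words.foldl (fun (st : List (List (List Char)) × List (List Char) × Int) w =>
    let groups := st.1
    let cur := st.2.1
    let n := st.2.2
    if n + w.length + 1 ≥ string_len - 1 then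
      (groups ++ [cur], [w], 2 + (w.length : Int) + 1)
    else (groups, cur ++ [w], n + w.length + 1)) ([], [], (2 : Int))

-- rendering pass: one group → one bordered line
def prep_text_alt_render (string_len : Int) (grp : List (List Char)) : List Char :=
  let line := ['|', ' '] ++ (grp.map (· ++ [' '])).flatten
  let line :=
    if (line.length : Int) < string_len - 1 then
      line ++ List.replicate (string_len - 1 - line.length).toNat ' '
    else line
  line ++ ['|']

def prep_text_alt (text : String) (string_len : Int) : String :=
  let words := PySem.Chars.splitOn text.toList [' ']
  let g := prep_text_alt_groups words string_len
  let groups := g.1 ++ [g.2.1]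
  String.ofList (PySem.Chars.join ['\n'] (groups.map (prep_text_alt_render string_len)))

-- ===== PRECONDITION & SPEC =====
def Spec_prep_text (text : String) (string_len : Int) (out : String) : Prop := out = prep_text_alt text string_len
instance (text : String) (string_len : Int) (out : String) : Decidable (Spec_prep_text text string_len out) := by unfold Spec_prep_text; infer_instance

-- ===== CLAIM (what is proved, stated in full; the proofs are below) =====
def Claim_equal_prep_text : Prop := ∀ (text : String) (string_len : Int), Dom_prep_text text string_len → Spec_prep_text text string_len (prep_text text string_len)

-- ===== LEMMAS AND PROOFS =====

-- the content of A's current line, as a function of B's current group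
def pvBody (grp : List (List Char)) : List Char :=
  ['|', ' '] ++ (grp.map (· ++ [' '])).flatten

theorem pvBody_append (grp : List (List Char)) (w : List Char) :
    pvBody (grp ++ [w]) = pvBody grp ++ w ++ [' '] := by
  simp [pvBody]

theorem pvBody_ends_space (grp : List (List Char)) :
    ∃ l, pvBody grp = l ++ [' '] := by
  induction grp using List.reverseRecOn with
  | nil => exact ⟨['|'], rfl⟩
  | append_singleton gs w _ => exact ⟨pvBody gs ++ w, by simp [pvBody_append]⟩

theorem pvBody_not_endswith_bar (grp : List (List Char)) :
    ¬ (PySem.Chars.endswith (pvBody grp) ['|'] = true) := by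
  obtain ⟨l, hl⟩ := pvBody_ends_space grp
  rw [hl, PySem.Chars.endswith_iff]
  rintro ⟨t, ht⟩
  have := congrArg List.getLast? ht
  simp at this

-- loop invariant: A's fold state is B's fold state through pvBody / render
theorem pv_fold_inv (string_len : Int) (words : List (List Char)) :
    ∀ (groups : List (List (List Char))) (cur : List (List Char)),
    words.foldl (fun (st : List (List Char) × List Char) word =>
      let strings := st.1
      let string := st.2
      let st' :=
        if ((string ++ word ++ [' ']).length : Int) ≥ string_len - 1 then
          let string :=
            if (string.length : Int) < string_len - 1 then
              string ++ List.replicate (string_len - 1 - string.length).toNat ' '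
            else string
          let string := string ++ ['|']
          (strings ++ [string], ['|', ' '])
        else (strings, string)
      (st'.1, st'.2 ++ word ++ [' '])) (groups.map (prep_text_alt_render string_len), pvBody cur)
    =
    (let g := words.foldl (fun (st : List (List (List Char)) × List (List Char) × Int) w =>
        let gs := st.1
        let c := st.2.1
        let n := st.2.2
        if n + w.length + 1 ≥ string_len - 1 then
          (gs ++ [c], [w], 2 + (w.length : Int) + 1)
        else (gs, c ++ [w], n + w.length + 1)) (groups, cur, ((pvBody cur).length : Int))
     (g.1.map (prep_text_alt_render string_len), pvBody g.2.1)) := by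
  induction words with
  | nil => intro groups cur; simp
  | cons w ws ih =>
    intro groups cur
    simp only [List.foldl_cons]
    have hlen : ((pvBody cur).length : Int) = (pvBody cur).length := rfl
    by_cases h : ((pvBody cur).length : Int) + w.length + 1 ≥ string_len - 1
    · have hA : (((pvBody cur ++ w ++ [' ']).length : Int) ≥ string_len - 1) := by
        simp; omega
      rw [if_pos h, if_pos hA]
      have := ih (groups ++ [cur]) [w]
      simp only [List.map_append, List.map_cons, List.map_nil] at this ⊢
      have hb : pvBody [w] = ['|', ' '] ++ w ++ [' '] := by simp [pvBody]
      have hn : ((pvBody [w]).length : Int) = 2 + (w.length : Int) + 1 := by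
        simp [pvBody]; ring
      rw [← hn, ← hb]
      simpa [prep_text_alt_render, pvBody] using this
    · have hA : ¬ (((pvBody cur ++ w ++ [' ']).length : Int) ≥ string_len - 1) := by
        simp; push_cast at h ⊢; omega
      rw [if_neg h, if_neg hA]
      have := ih groups (cur ++ [w])
      have hb : pvBody (cur ++ [w]) = pvBody cur ++ w ++ [' '] := pvBody_append cur w
      have hn : ((pvBody (cur ++ [w])).length : Int) = ((pvBody cur).length : Int) + w.length + 1 := by
        rw [hb]; simp; ring
      rw [← hb, ← hn]
      exact this

-- ===== VERDICT (by name: the statement is the Claim_ definition above) =====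
theorem prep_text_spec : Claim_equal_prep_text := by
  intro text string_len _
  unfold Spec_prep_text prep_text prep_text_alt prep_text_alt_groups
  have h := pv_fold_inv string_len (PySem.Chars.splitOn text.toList [' ']) [] []
  have hb0 : pvBody [] = ['|', ' '] := by simp [pvBody]
  have h2 : (((['|', ' '] : List Char).length : Nat) : Int) = 2 := by norm_num
  rw [hb0, h2] at h
  simp only [List.map_nil] at h
  simp only [h]
  rw [if_pos (pvBody_not_endswith_bar _)]
  simp [prep_text_alt_render, pvBody, List.map_append]
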